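-- pv_equiv track=rewrite | github.com/trhariharasudhan/GrandpaAssistant | backend/app/shared/iot_control.py | _meaningful_tokens
-- ===== SOURCE A (Python) =====
-- from typing import Any
--
-- def _compact_text(value: Any) -> str:
--     return " ".join(str(value or "").split()).strip()
--
-- def _normalize_text(value: Any) -> str:
--     return "".join(
--         character.lower() if character.isalnum() else " "
--         for character in _compact_text(value)
--     ).strip()
--
-- def _meaningful_tokens(value: str) -> set[str]:
--     stopwords = {
--         "the",
--         "a",
--         "an",
--         "my",
--         "your",
--         "to",
--         "for",
--         "smart",
--         "home",
--         "device",
--     }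
--     return {token for token in _normalize_text(value).split() if token and token not in stopwords}
-- ===== SOURCE B (Python) =====
-- def _meaningful_tokens(value):
--     stopwords = {
--         "the", "a", "an", "my", "your", "to", "for", "smart", "home", "device",
--     }
--     result = set()
--     buf = []
--     for ch in str(value or ""):
--         if ch.isalnum():
--             buf.append(ch.lower())
--         else:
--             if buf:
--                 token = "".join(buf)
--                 if token not in stopwords:
--                     result.add(token)
--                 buf = []
--     if buf:
--         token = "".join(buf)
--         if token not in stopwords:
--             result.add(token)
--     return result
-- ===== Notes on version B (the rewrite author's own statement) =====
-- stated objective: alternative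
-- what changed: Replaces the multi-pass pipeline (whitespace-split, join-with-spaces, strip, per-char normalize, strip, split again, filter) with a single fused left-to-right character scan that accumulates lowered alphanumeric runs in a buffer and flushes each completed non-stopword token straight into the result set, building no intermediate strings.
import Mathlib
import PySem

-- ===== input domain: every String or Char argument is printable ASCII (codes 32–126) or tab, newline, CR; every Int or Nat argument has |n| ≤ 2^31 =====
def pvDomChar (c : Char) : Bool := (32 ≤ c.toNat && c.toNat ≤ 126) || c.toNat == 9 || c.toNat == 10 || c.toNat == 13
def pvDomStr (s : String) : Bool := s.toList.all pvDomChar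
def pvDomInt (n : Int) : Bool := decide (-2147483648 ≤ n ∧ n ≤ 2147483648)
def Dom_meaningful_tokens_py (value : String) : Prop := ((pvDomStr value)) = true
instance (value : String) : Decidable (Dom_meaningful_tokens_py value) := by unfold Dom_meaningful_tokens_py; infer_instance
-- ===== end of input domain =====

-- B replaces A's multi-pass pipeline (split/join/strip, per-char normalize, strip, split, filter)
-- by one fused left-to-right character scan that flushes lowered alphanumeric runs into the result set.

-- ===== PORT A =====
def pvStopwords : PySem.Set String :=
  PySem.Set.ofList ["the", "a", "an", "my", "your", "to", "for", "smart", "home", "device"]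

def pvCompactText (value : String) : String :=
  PySem.Str.strip (PySem.Str.join " " (PySem.Str.split₀ (if value = "" then "" else value)))

def pvNormalizeText (value : String) : String :=
  PySem.Str.strip (PySem.Str.join ""
    ((pvCompactText value).toList.map (fun c =>
      if PySem.Chars.isalnum c then PySem.Str.lower (String.ofList [c]) else " ")))

def meaningful_tokens_py (value : String) : List String :=
  PySem.Set.ofList ((PySem.Str.split₀ (pvNormalizeText value)).filter
    (fun t => !(t == "") && !(PySem.Set.contains pvStopwords t)))

-- ===== PORT B =====
def pvStopB : PySem.Set String :=
  PySem.Set.ofList ["the", "a", "an", "my", "your", "to", "for", "smart", "home", "device"]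

-- the body of Source B's flush block: token = "".join(buf); if token not in stopwords: result.add(token)
def pvAddTok (res : PySem.Set String) (buf : List Char) : PySem.Set String :=
  if PySem.Set.contains pvStopB (String.ofList buf) then res else PySem.Set.add res (String.ofList buf)

-- Source B's "if buf: …" flush
def pvFlushB (res : PySem.Set String) (buf : List Char) : PySem.Set String :=
  if buf.isEmpty then res else pvAddTok res buf

-- the loop body of Source B
def pvStepB (st : List Char × PySem.Set String) (c : Char) : List Char × PySem.Set String :=
  if PySem.Chars.isalnum c then (st.1 ++ [PySem.Chars.lowerChar c], st.2)
  else ([], pvFlushB st.2 st.1)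

def meaningful_tokens_py_alt (value : String) : List String :=
  let s := if value = "" then "" else value
  let fin := s.toList.foldl pvStepB ([], PySem.Set.empty)
  pvFlushB fin.2 fin.1

-- ===== PRECONDITION & SPEC =====
def Spec_meaningful_tokens_py (value : String) (out : List String) : Prop := out = meaningful_tokens_py_alt value
instance (value : String) (out : List String) : Decidable (Spec_meaningful_tokens_py value out) := by unfold Spec_meaningful_tokens_py; infer_instance

-- ===== CLAIM (what is proved, stated in full; the proofs are below) =====
def Claim_equal_meaningful_tokens_py : Prop := ∀ (value : String), Dom_meaningful_tokens_py value → Spec_meaningful_tokens_py value (meaningful_tokens_py value)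

-- ===== LEMMAS AND PROOFS =====

-- the reference tokenizer: maximal alphanumeric runs of cs, lowercased; buf is the current run
def pvToks : List Char → List Char → List (List Char)
  | [], buf => if buf.isEmpty then [] else [buf]
  | c :: cs, buf =>
    if PySem.Chars.isalnum c then pvToks cs (buf ++ [PySem.Chars.lowerChar c])
    else if buf.isEmpty then pvToks cs [] else buf :: pvToks cs []

def pvF (c : Char) : Char := if PySem.Chars.isalnum c then PySem.Chars.lowerChar c else ' '

lemma pvOrEmpty (value : String) : (if value = "" then "" else value) = value := by
  split <;> simp_all

lemma pvStop_eq : pvStopwords = pvStopB := rfl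

lemma pvChar_isspace_lower (c : Char) (h : PySem.Chars.isalnum c = true) :
    PySem.Chars.isspace (PySem.Chars.lowerChar c) = false := by
  unfold PySem.Chars.isalnum PySem.Chars.isalpha PySem.Chars.isdigit PySem.Chars.isupper
    PySem.Chars.islower at h
  simp only [Bool.or_eq_true, Bool.and_eq_true, decide_eq_true_eq, Char.le_def] at h
  unfold PySem.Chars.lowerChar PySem.Chars.isupper
  by_cases hu : (decide ('A' ≤ c) && decide (c ≤ 'Z')) = true
  · rw [if_pos hu]
    simp only [Bool.and_eq_true, decide_eq_true_eq, Char.le_def] at hu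
    have hv : (c.toNat + 32).isValidChar := by
      left
      have : c.toNat ≤ 90 := by exact_mod_cast hu.2
      omega
    unfold PySem.Chars.isspace
    have ht : (Char.ofNat (c.toNat + 32)).toNat = c.toNat + 32 := by
      rw [Char.toNat_ofNat, if_pos hv]
    have h65 : 65 ≤ c.toNat := by exact_mod_cast hu.1
    have h90 : c.toNat ≤ 90 := by exact_mod_cast hu.2
    simp only [ht]
    simp only [Bool.or_eq_false_iff, Bool.and_eq_false_iff, decide_eq_false_iff_not]
    omega
  · rw [if_neg hu]
    simp only [Bool.and_eq_true, decide_eq_true_eq, Char.le_def, not_and_or] at hu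
    unfold PySem.Chars.isspace
    have hr : (97 ≤ c.toNat ∧ c.toNat ≤ 122) ∨ (48 ≤ c.toNat ∧ c.toNat ≤ 57) := by
      rcases h with (h | h) | h
      · exfalso
        rcases hu with hu | hu
        · exact hu h.1
        · exact hu h.2
      · left; exact ⟨by exact_mod_cast h.1, by exact_mod_cast h.2⟩
      · right; exact ⟨by exact_mod_cast h.1, by exact_mod_cast h.2⟩
    simp only [Bool.or_eq_false_iff, Bool.and_eq_false_iff, decide_eq_false_iff_not]
    omega

lemma pvChar_space_not_alnum (c : Char) (h : PySem.Chars.isspace c = true) :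
    PySem.Chars.isalnum c = false := by
  unfold PySem.Chars.isspace at h
  simp only [Bool.or_eq_true, Bool.and_eq_true, decide_eq_true_eq] at h
  unfold PySem.Chars.isalnum PySem.Chars.isalpha PySem.Chars.isdigit PySem.Chars.isupper
    PySem.Chars.islower
  simp only [Bool.or_eq_false_iff, Bool.and_eq_false_iff, decide_eq_false_iff_not,
    Char.le_def]
  have h65 : ('A' : Char).toNat = 65 := rfl
  have : (65 : Nat) = ('A' : Char).toNat := rfl
  constructor
  · constructor
    · rw [show ('A' : Char).val ≤ c.val ↔ 65 ≤ c.toNat from by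
        constructor <;> (intro hx; exact_mod_cast hx), show c.val ≤ ('Z' : Char).val ↔ c.toNat ≤ 90 from by
        constructor <;> (intro hx; exact_mod_cast hx)]
      omega
    · rw [show ('a' : Char).val ≤ c.val ↔ 97 ≤ c.toNat from by
        constructor <;> (intro hx; exact_mod_cast hx), show c.val ≤ ('z' : Char).val ↔ c.toNat ≤ 122 from by
        constructor <;> (intro hx; exact_mod_cast hx)]
      omega
  · rw [show ('0' : Char).val ≤ c.val ↔ 48 ≤ c.toNat from by
      constructor <;> (intro hx; exact_mod_cast hx), show c.val ≤ ('9' : Char).val ↔ c.toNat ≤ 57 from by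
      constructor <;> (intro hx; exact_mod_cast hx)]
    omega

-- go equations
lemma pv_go_nil' (cur : List Char) (acc : List (List Char)) :
    PySem.Chars.split₀.go [] cur acc =
      if cur.isEmpty then acc.reverse else (cur.reverse :: acc).reverse := by
  simp [PySem.Chars.split₀.go]

lemma pv_go_cons (c : Char) (rest cur : List Char) (acc : List (List Char)) :
    PySem.Chars.split₀.go (c :: rest) cur acc =
      if PySem.Chars.isspace c then
        (if cur.isEmpty then PySem.Chars.split₀.go rest [] acc
         else PySem.Chars.split₀.go rest [] (cur.reverse :: acc))
      else PySem.Chars.split₀.go rest (c :: cur) acc := by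
  simp [PySem.Chars.split₀.go]

lemma pv_go_spaces (ws : List Char) (h : ∀ c ∈ ws, PySem.Chars.isspace c = true) :
    ∀ (cur : List Char) (acc : List (List Char)),
      PySem.Chars.split₀.go ws cur acc =
        if cur.isEmpty then acc.reverse else (cur.reverse :: acc).reverse := by
  induction ws with
  | nil => intro cur acc; exact pv_go_nil' cur acc
  | cons c ws ih =>
    intro cur acc
    have hc := h c (by simp)
    rw [pv_go_cons, if_pos hc]
    have ih' := ih (fun d hd => h d (by simp [hd]))
    by_cases hcur : cur.isEmpty
    · rw [if_pos hcur, ih' [] acc]; simp [hcur]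
    · rw [if_neg hcur, ih' [] (cur.reverse :: acc)]; simp [hcur]

lemma pv_go_append_spaces (xs ws : List Char) (h : ∀ c ∈ ws, PySem.Chars.isspace c = true) :
    ∀ (cur : List Char) (acc : List (List Char)),
      PySem.Chars.split₀.go (xs ++ ws) cur acc = PySem.Chars.split₀.go xs cur acc := by
  induction xs with
  | nil =>
    intro cur acc
    rw [List.nil_append, pv_go_spaces ws h cur acc, pv_go_nil']
  | cons c xs ih =>
    intro cur acc
    rw [List.cons_append, pv_go_cons, pv_go_cons]
    by_cases hs : PySem.Chars.isspace c
    · rw [if_pos hs, if_pos hs]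
      by_cases hcur : cur.isEmpty
      · rw [if_pos hcur, if_pos hcur, ih]
      · rw [if_neg hcur, if_neg hcur, ih]
    · rw [if_neg hs, if_neg hs, ih]

lemma pv_split₀_rstrip (xs : List Char) :
    PySem.Chars.split₀ (PySem.Chars.rstrip xs) = PySem.Chars.split₀ xs := by
  have hdec : xs = PySem.Chars.rstrip xs ++ (xs.reverse.takeWhile PySem.Chars.isspace).reverse := by
    unfold PySem.Chars.rstrip
    conv_lhs => rw [← List.reverse_reverse xs, ← List.takeWhile_append_dropWhile
      (p := PySem.Chars.isspace) (l := xs.reverse)]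
    rw [List.reverse_append]
  have hws : ∀ c ∈ (xs.reverse.takeWhile PySem.Chars.isspace).reverse,
      PySem.Chars.isspace c = true := by
    intro c hc
    rw [List.mem_reverse] at hc
    exact List.mem_takeWhile_imp hc
  conv_rhs => rw [hdec]
  unfold PySem.Chars.split₀
  rw [pv_go_append_spaces _ _ hws]

lemma pv_go_lstrip (xs : List Char) :
    ∀ (acc : List (List Char)),
      PySem.Chars.split₀.go (xs.dropWhile PySem.Chars.isspace) [] acc =
        PySem.Chars.split₀.go xs [] acc := by
  induction xs with
  | nil => intro acc; rfl
  | cons c xs ih =>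
    intro acc
    by_cases hs : PySem.Chars.isspace c
    · rw [List.dropWhile_cons_of_pos hs, ih, pv_go_cons, if_pos hs]
      simp
    · rw [List.dropWhile_cons_of_neg (by simpa using hs)]

lemma pv_split₀_strip (xs : List Char) :
    PySem.Chars.split₀ (PySem.Chars.strip xs) = PySem.Chars.split₀ xs := by
  unfold PySem.Chars.strip
  rw [pv_split₀_rstrip]
  unfold PySem.Chars.lstrip PySem.Chars.split₀
  exact pv_go_lstrip xs []

lemma pv_go_map (cs : List Char) :
    ∀ (cur : List Char) (acc : List (List Char)),
      PySem.Chars.split₀.go (cs.map pvF) cur acc = acc.reverse ++ pvToks cs cur.reverse := by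
  induction cs with
  | nil =>
    intro cur acc
    rw [List.map_nil, pv_go_nil']
    cases cur <;> simp [pvToks]
  | cons c cs ih =>
    intro cur acc
    rw [List.map_cons]
    by_cases hc : PySem.Chars.isalnum c
    · have hf : pvF c = PySem.Chars.lowerChar c := if_pos hc
      rw [hf, pv_go_cons, if_neg (by simp [pvChar_isspace_lower c hc]), ih]
      simp [pvToks, hc]
    · have hf : pvF c = ' ' := if_neg hc
      have hsp : PySem.Chars.isspace ' ' = true := by decide
      rw [hf, pv_go_cons, if_pos hsp]
      by_cases hcur : cur.isEmpty
      · rw [if_pos hcur, ih]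
        have : cur = [] := by cases cur <;> simp_all
        simp [this, pvToks, hc]
      · rw [if_neg hcur, ih [] (cur.reverse :: acc)]
        have : cur.reverse.isEmpty = false := by cases cur <;> simp_all
        simp [pvToks, hc, this]

lemma pv_split₀_map (cs : List Char) :
    PySem.Chars.split₀ (cs.map pvF) = pvToks cs [] := by
  unfold PySem.Chars.split₀
  rw [pv_go_map cs [] []]
  simp

lemma pvToks_spaces (ws : List Char) (h : ∀ c ∈ ws, PySem.Chars.isspace c = true) :
    ∀ (buf : List Char), pvToks ws buf = if buf.isEmpty then [] else [buf] := by
  induction ws with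
  | nil => intro buf; simp [pvToks]
  | cons c ws ih =>
    intro buf
    have hc : PySem.Chars.isalnum c = false := pvChar_space_not_alnum c (h c (by simp))
    have ih' := ih (fun d hd => h d (by simp [hd]))
    by_cases hbuf : buf.isEmpty
    · simp [pvToks, hc, hbuf, ih']
    · simp [pvToks, hc, hbuf, ih']

lemma pvToks_append_spaces (xs ws : List Char) (h : ∀ c ∈ ws, PySem.Chars.isspace c = true) :
    ∀ (buf : List Char), pvToks (xs ++ ws) buf = pvToks xs buf := by
  induction xs with
  | nil =>
    intro buf
    rw [List.nil_append, pvToks_spaces ws h buf]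
    simp [pvToks]
  | cons c xs ih =>
    intro buf
    rw [List.cons_append]
    by_cases hc : PySem.Chars.isalnum c
    · simp [pvToks, hc, ih]
    · by_cases hbuf : buf.isEmpty <;> simp [pvToks, hc, hbuf, ih]

lemma pvToks_dropWhile (xs : List Char) :
    pvToks (xs.dropWhile PySem.Chars.isspace) [] = pvToks xs [] := by
  induction xs with
  | nil => rfl
  | cons c xs ih =>
    by_cases hs : PySem.Chars.isspace c
    · have hc : PySem.Chars.isalnum c = false := pvChar_space_not_alnum c hs
      rw [List.dropWhile_cons_of_pos hs, ih]
      simp [pvToks, hc]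
    · rw [List.dropWhile_cons_of_neg (by simpa using hs)]

lemma pvToks_strip (xs : List Char) :
    pvToks (PySem.Chars.strip xs) [] = pvToks xs [] := by
  unfold PySem.Chars.strip
  have hdec : PySem.Chars.lstrip xs =
      PySem.Chars.rstrip (PySem.Chars.lstrip xs) ++
        ((PySem.Chars.lstrip xs).reverse.takeWhile PySem.Chars.isspace).reverse := by
    unfold PySem.Chars.rstrip
    conv_lhs => rw [← List.reverse_reverse (PySem.Chars.lstrip xs), ← List.takeWhile_append_dropWhile
      (p := PySem.Chars.isspace) (l := (PySem.Chars.lstrip xs).reverse)]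
    rw [List.reverse_append]
  have hws : ∀ c ∈ ((PySem.Chars.lstrip xs).reverse.takeWhile PySem.Chars.isspace).reverse,
      PySem.Chars.isspace c = true := by
    intro c hc
    rw [List.mem_reverse] at hc
    exact List.mem_takeWhile_imp hc
  have h1 : pvToks (PySem.Chars.rstrip (PySem.Chars.lstrip xs)) [] = pvToks (PySem.Chars.lstrip xs) [] := by
    conv_rhs => rw [hdec]
    rw [pvToks_append_spaces _ _ hws]
  rw [h1]
  unfold PySem.Chars.lstrip
  exact pvToks_dropWhile xs

lemma pvToks_split_space (c : Char) (b : List Char) (hs : PySem.Chars.isspace c = true) :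
    ∀ (a buf : List Char), pvToks (a ++ c :: b) buf = pvToks a buf ++ pvToks b [] := by
  have hc : PySem.Chars.isalnum c = false := pvChar_space_not_alnum c hs
  intro a
  induction a with
  | nil =>
    intro buf
    by_cases hbuf : buf.isEmpty <;> simp [pvToks, hc, hbuf]
  | cons x a ih =>
    intro buf
    rw [List.cons_append]
    by_cases hx : PySem.Chars.isalnum x
    · simp [pvToks, hx, ih]
    · by_cases hbuf : buf.isEmpty <;> simp [pvToks, hx, hbuf, ih]

lemma pvToks_join (ws : List (List Char)) :
    pvToks (PySem.Chars.join [' '] ws) [] = ws.flatMap (fun w => pvToks w []) := by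
  induction ws with
  | nil => simp [PySem.Chars.join, List.intercalate, pvToks]
  | cons w ws ih =>
    cases ws with
    | nil => simp [PySem.Chars.join_singleton]
    | cons w' rest =>
      rw [PySem.Chars.join_cons_cons]
      have : w ++ [' '] ++ PySem.Chars.join [' '] (w' :: rest) =
          w ++ ' ' :: PySem.Chars.join [' '] (w' :: rest) := by simp
      rw [this, pvToks_split_space ' ' _ (by decide) w [], ih]
      simp

lemma pv_go_flatMap (cs : List Char) :
    ∀ (cur : List Char) (acc : List (List Char)),
      ((PySem.Chars.split₀.go cs cur acc).flatMap fun w => pvToks w []) =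
        (acc.reverse.flatMap fun w => pvToks w []) ++ pvToks (cur.reverse ++ cs) [] := by
  induction cs with
  | nil =>
    intro cur acc
    rw [pv_go_nil']
    by_cases hcur : cur.isEmpty
    · have : cur = [] := by cases cur <;> simp_all
      simp [this, pvToks]
    · rw [if_neg hcur]
      simp [List.append_nil]
  | cons c cs ih =>
    intro cur acc
    rw [pv_go_cons]
    by_cases hs : PySem.Chars.isspace c
    · have hc : PySem.Chars.isalnum c = false := pvChar_space_not_alnum c hs
      rw [if_pos hs]
      by_cases hcur : cur.isEmpty
      · have hnil : cur = [] := by cases cur <;> simp_all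
        rw [if_pos hcur, ih]
        simp [hnil, pvToks, hc]
      · rw [if_neg hcur, ih]
        rw [pvToks_split_space c cs hs cur.reverse []]
        simp
    · rw [if_neg hs, ih]
      simp

lemma pv_split₀_flatMap (cs : List Char) :
    ((PySem.Chars.split₀ cs).flatMap fun w => pvToks w []) = pvToks cs [] := by
  unfold PySem.Chars.split₀
  rw [pv_go_flatMap cs [] []]
  simp

lemma pvToks_ne_nil (cs : List Char) :
    ∀ (buf t : List Char), t ∈ pvToks cs buf → t ≠ [] := by
  induction cs with
  | nil =>
    intro buf t ht
    by_cases hbuf : buf.isEmpty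
    · simp [pvToks, hbuf] at ht
    · simp [pvToks, hbuf] at ht
      have hbuf' : buf ≠ [] := by simpa using hbuf
      rw [ht]; exact hbuf'
  | cons c cs ih =>
    intro buf t ht
    by_cases hc : PySem.Chars.isalnum c
    · exact ih _ t (by simpa [pvToks, hc] using ht)
    · by_cases hbuf : buf.isEmpty
      · exact ih [] t (by simpa [pvToks, hc, hbuf] using ht)
      · simp [pvToks, hc, hbuf] at ht
        rcases ht with ht | ht
        · have hbuf' : buf ≠ [] := by simpa using hbuf
          rw [ht]; exact hbuf'
        · exact ih [] t ht

lemma pvFoldFilter (toks : List (List Char)) :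
    ∀ (res : PySem.Set String), (∀ t ∈ toks, t ≠ []) →
      ((toks.map String.ofList).filter
          (fun t => !(t == "") && !(PySem.Set.contains pvStopwords t))).foldl PySem.Set.add res =
        toks.foldl pvAddTok res := by
  induction toks with
  | nil => intro res _; rfl
  | cons w toks ih =>
    intro res h
    have hw : w ≠ [] := h w (by simp)
    have hne : (String.ofList w == "") = false := by
      simp only [beq_eq_false_iff_ne, ne_eq]
      intro h'
      exact hw (by simpa using congrArg String.toList h')
    rw [List.map_cons, List.filter_cons]
    by_cases hcw : PySem.Set.contains pvStopwords (String.ofList w)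
    · have hcwt : PySem.Set.contains pvStopwords (String.ofList w) = true := hcw
      rw [if_neg (by rw [hne, hcwt]; simp)]
      rw [ih res (fun t ht => h t (by simp [ht]))]
      rw [List.foldl_cons]
      have : pvAddTok res w = res := by
        unfold pvAddTok
        rw [if_pos (by rw [← pvStop_eq]; exact hcw)]
      rw [this]
    · have hcwf : PySem.Set.contains pvStopwords (String.ofList w) = false := by
        simpa using hcw
      rw [if_pos (by rw [hne, hcwf]; simp)]
      rw [List.foldl_cons, List.foldl_cons]
      rw [ih _ (fun t ht => h t (by simp [ht]))]
      have : pvAddTok res w = PySem.Set.add res (String.ofList w) := by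
        unfold pvAddTok
        rw [if_neg (by rw [← pvStop_eq]; exact hcw)]
      rw [this]

lemma pvScan (cs : List Char) :
    ∀ (buf : List Char) (res : PySem.Set String),
      pvFlushB (cs.foldl pvStepB (buf, res)).2 (cs.foldl pvStepB (buf, res)).1 =
        (pvToks cs buf).foldl pvAddTok res := by
  induction cs with
  | nil =>
    intro buf res
    by_cases hbuf : buf.isEmpty
    · simp [pvFlushB, pvToks, hbuf]
    · simp [pvFlushB, pvToks, hbuf]
  | cons c cs ih =>
    intro buf res
    rw [List.foldl_cons]
    by_cases hc : PySem.Chars.isalnum c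
    · have : pvStepB (buf, res) c = (buf ++ [PySem.Chars.lowerChar c], res) := by
        unfold pvStepB; rw [if_pos hc]
      rw [this, ih]
      simp [pvToks, hc]
    · have hstep : pvStepB (buf, res) c = ([], pvFlushB res buf) := by
        unfold pvStepB; rw [if_neg hc]
      rw [hstep, ih]
      by_cases hbuf : buf.isEmpty
      · simp [pvToks, hc, hbuf, pvFlushB]
      · simp [pvToks, hc, hbuf, pvFlushB]

lemma pvNormalize_toList (value : String) :
    (pvNormalizeText value).toList =
      PySem.Chars.strip ((pvCompactText value).toList.map pvF) := by
  unfold pvNormalizeText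
  rw [PySem.Str.toList_strip, PySem.Str.toList_join]
  refine congrArg PySem.Chars.strip ?_
  have hmap : ((pvCompactText value).toList.map (fun c =>
        if PySem.Chars.isalnum c then PySem.Str.lower (String.ofList [c]) else " ")).map String.toList =
      ((pvCompactText value).toList.map pvF).map (fun c => [c]) := by
    rw [List.map_map, List.map_map]
    apply List.map_congr_left
    intro c _
    by_cases hc : PySem.Chars.isalnum c
    · simp only [Function.comp_apply, if_pos hc, pvF]
      rw [PySem.Str.toList_lower]
      simp [PySem.Chars.lower]
    · simp only [Function.comp_apply, if_neg hc, pvF]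
      simp
  rw [hmap, show ("" : String).toList = [] from rfl, PySem.Chars.join_nil_singletons]

lemma pvCompact_toList (value : String) :
    (pvCompactText value).toList =
      PySem.Chars.strip (PySem.Chars.join [' '] (PySem.Chars.split₀ value.toList)) := by
  unfold pvCompactText
  rw [pvOrEmpty, PySem.Str.toList_strip, PySem.Str.toList_join, PySem.Str.split₀_map_toList]
  rfl

lemma pvTokensA (value : String) :
    PySem.Str.split₀ (pvNormalizeText value) = (pvToks value.toList []).map String.ofList := by
  show List.map String.ofList (PySem.Chars.split₀ (pvNormalizeText value).toList) = _
  refine congrArg (List.map String.ofList) ?_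
  rw [pvNormalize_toList, pv_split₀_strip, pv_split₀_map, pvCompact_toList, pvToks_strip,
    pvToks_join, pv_split₀_flatMap]

-- ===== VERDICT (by name: the statement is the Claim_ definition above) =====
theorem meaningful_tokens_py_spec : Claim_equal_meaningful_tokens_py := by
  intro value _
  unfold Spec_meaningful_tokens_py
  unfold meaningful_tokens_py
  rw [pvTokensA]
  have h1 : PySem.Set.ofList (((pvToks value.toList []).map String.ofList).filter
      (fun t => !(t == "") && !(PySem.Set.contains pvStopwords t))) =
      (pvToks value.toList []).foldl pvAddTok [] := by
    show (((pvToks value.toList []).map String.ofList).filter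
      (fun t => !(t == "") && !(PySem.Set.contains pvStopwords t))).foldl PySem.Set.add [] = _
    exact pvFoldFilter _ [] (fun t ht => pvToks_ne_nil value.toList [] t ht)
  rw [h1]
  unfold meaningful_tokens_py_alt
  rw [pvOrEmpty]
  exact (pvScan value.toList [] []).symm
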